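-- pv_equiv track=rewrite | github.com/ersilia-os/osa-murd | pocketvec/PDB/scripts/superpose_sts_PDB_LIG.py | assign_outliers
-- ===== SOURCE A (Python) =====
-- def assign_outliers(clust_count, real_clusters, coords):
--
--     clust_count += 1
--     coords = {i: j for i, j in zip(range(len(coords)), coords)}
--
--     for i in sorted(coords):
--         if i not in real_clusters:
--             real_clusters[i] = clust_count
--             clust_count += 1
--
--     return real_clusters
-- ===== SOURCE B (Python) =====
-- def assign_outliers(clust_count, real_clusters, coords):
--     # Sort the in-range keys once, then merge them with range(n) via a two-pointer
--     # sweep; each outlier's label is the closed form clust_count + 1 + i - j,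
--     # where j outliers-so-far is recovered as the number of present keys passed.
--     n = len(coords)
--     present = sorted(k for k in real_clusters if 0 <= k < n)
--     j = 0
--     for i in range(n):
--         if j < len(present) and present[j] == i:
--             j += 1
--         else:
--             real_clusters[i] = clust_count + 1 + i - j
--     return real_clusters
-- ===== Notes on version B (the rewrite author's own statement) =====
-- stated objective: alternative
-- what changed: A tests membership of every index in the dict and carries a mutating counter; B instead sorts the in-range keys once and does a two-pointer merge of that sorted list with range(n), computing each outlier label by the closed form clust_count+1+i-j with no per-index dict lookup and no running label counter.
import Mathlib
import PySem

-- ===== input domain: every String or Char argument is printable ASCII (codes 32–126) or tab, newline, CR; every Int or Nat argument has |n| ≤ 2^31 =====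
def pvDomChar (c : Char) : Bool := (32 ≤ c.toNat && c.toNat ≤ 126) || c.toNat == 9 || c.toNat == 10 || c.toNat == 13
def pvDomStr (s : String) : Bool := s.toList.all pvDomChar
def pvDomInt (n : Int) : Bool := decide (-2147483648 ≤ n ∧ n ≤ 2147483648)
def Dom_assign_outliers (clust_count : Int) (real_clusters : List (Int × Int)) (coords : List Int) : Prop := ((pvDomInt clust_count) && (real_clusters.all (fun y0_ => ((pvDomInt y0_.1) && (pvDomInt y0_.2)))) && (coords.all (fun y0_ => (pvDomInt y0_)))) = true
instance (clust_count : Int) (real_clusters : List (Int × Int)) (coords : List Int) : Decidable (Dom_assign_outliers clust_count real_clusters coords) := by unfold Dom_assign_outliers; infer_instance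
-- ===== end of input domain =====

-- B replaces A's per-index dict membership test and mutating label counter by a one-time sort
-- of the in-range keys and a two-pointer merge with range(n); each outlier's label is the
-- closed form clust_count+1+i-j (alternative algorithm, similar cost).
-- Both Pythons mutate real_clusters in place and return it; the equivalence is about the
-- returned mapping (B performs the same mutation).

-- ===== PORT A =====
def assign_outliers (clust_count : Int) (real_clusters : List (Int × Int)) (coords : List Int) : List (Int × Int) :=
  let clust_count1 := clust_count + 1
  -- coords = {i: j for i, j in zip(range(len(coords)), coords)}
  let coordsD : PySem.Dict Int Int :=
    PySem.Dict.ofList ((PySem.List.pyRange 0 (coords.length : Int) 1).zip coords)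
  -- for i in sorted(coords): if i not in real_clusters: real_clusters[i] = clust_count; clust_count += 1
  let st := (PySem.List.sorted coordsD.keys (fun x => x) false).foldl
      (fun (st : PySem.Dict Int Int × Int) i =>
        if st.1.contains i then st else (st.1.insert i st.2, st.2 + 1))
      (PySem.Dict.ofList real_clusters, clust_count1)
  st.1.items

-- ===== PORT B =====
def assign_outliers_alt (clust_count : Int) (real_clusters : List (Int × Int)) (coords : List Int) : List (Int × Int) :=
  let n : Int := (coords.length : Int)
  let d0 := PySem.Dict.ofList real_clusters
  -- present = sorted(k for k in real_clusters if 0 <= k < n)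
  let present := PySem.List.sorted (d0.keys.filter (fun k => decide (0 ≤ k) && decide (k < n))) (fun x => x) false
  -- j = 0; for i in range(n): if j < len(present) and present[j] == i: j += 1
  --                           else: real_clusters[i] = clust_count + 1 + i - j
  let st := (PySem.List.pyRange 0 n 1).foldl
      (fun (st : PySem.Dict Int Int × Int) i =>
        if decide (st.2 < (present.length : Int)) && (PySem.List.pyGet? present st.2 == some i)
        then (st.1, st.2 + 1)
        else (st.1.insert i (clust_count + 1 + i - st.2), st.2))
      (d0, 0)
  st.1.items

-- ===== PRECONDITION & SPEC =====
def Spec_assign_outliers (clust_count : Int) (real_clusters : List (Int × Int)) (coords : List Int) (out : List (Int × Int)) : Prop := out = assign_outliers_alt clust_count real_clusters coords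
instance (clust_count : Int) (real_clusters : List (Int × Int)) (coords : List Int) (out : List (Int × Int)) : Decidable (Spec_assign_outliers clust_count real_clusters coords out) := by unfold Spec_assign_outliers; infer_instance

-- ===== CLAIM (what is proved, stated in full; the proofs are below) =====
def Claim_equal_assign_outliers : Prop := ∀ (clust_count : Int) (real_clusters : List (Int × Int)) (coords : List Int), Dom_assign_outliers clust_count real_clusters coords → Spec_assign_outliers clust_count real_clusters coords (assign_outliers clust_count real_clusters coords)

-- ===== LEMMAS AND PROOFS =====

-- keys of the coords dict: zipping a Nodup index list of matching length keeps exactly those keys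
theorem keys_ofList_zip (l : List Int) (coords : List Int) (h : l.Nodup)
    (hl : l.length ≤ coords.length) :
    (PySem.Dict.ofList (l.zip coords)).keys = l := by
  have h1 : PySem.Dict.ofList (l.zip coords)
      = (l.zip coords).foldl (fun d p => d.insert p.1 p.2) PySem.Dict.empty := rfl
  rw [h1, PySem.Dict.keys_foldl_insert_key (key := Prod.fst) (f := fun _ p => p.2)]
  have hz : (l.zip coords).map Prod.fst = l := List.map_fst_zip hl
  simp [hz, PySem.Set.update_nil_left, PySem.Dict.keys_empty,
    PySem.Set.ofList_eq_self_of_nodup l h]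

-- sorted() of the (already increasing) key range is itself
theorem sorted_pyRange (a b : Int) :
    PySem.List.sorted (PySem.List.pyRange a b 1) (fun x => x) false
      = PySem.List.pyRange a b 1 :=
  PySem.List.sorted_eq_self_of_pairwise (PySem.List.pyRange a b 1) (fun x => x)
    ((PySem.List.pairwise_lt_pyRange_one a b).imp (fun h => le_of_lt h))

-- two-pointer rank lemma: on a strictly increasing list, the index #{k < n} points at n iff n is present
theorem rank_get (p : List Int) (hp : p.Pairwise (· < ·)) (n : Int) :
    ((p.filter (fun k => decide (k < n))).length < p.length ∧
      p[(p.filter (fun k => decide (k < n))).length]? = some n) ↔ n ∈ p := by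
  induction p with
  | nil => simp
  | cons a t ih =>
      rcases List.pairwise_cons.mp hp with ⟨ha, ht⟩
      rcases lt_trichotomy a n with hlt | heq | hgt
      · have : decide (a < n) = true := by simpa using hlt
        simp only [List.filter_cons, this, if_true, List.length_cons, List.getElem?_cons_succ,
          List.mem_cons, Nat.add_lt_add_iff_right]
        rw [ih ht]
        constructor
        · exact fun h => Or.inr h
        · rintro (h | h)
          · exact absurd h.symm (ne_of_lt hlt)
          · exact h
      · subst heq
        have h1 : decide (a < a) = false := by simp
        have h2 : t.filter (fun k => decide (k < a)) = [] := by
          apply List.filter_eq_nil_iff.mpr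
          intro b hb
          simp [not_lt.mpr (le_of_lt (ha b hb))]
        simp [h2]
      · have h1 : decide (a < n) = false := by simp [not_lt.mpr (le_of_lt hgt)]
        have h2 : t.filter (fun k => decide (k < n)) = [] := by
          apply List.filter_eq_nil_iff.mpr
          intro b hb
          simp [not_lt.mpr (le_of_lt (lt_trans hgt (ha b hb)))]
        have h3 : n ∉ t := fun h => absurd (ha n h) (not_lt.mpr (le_of_lt hgt))
        simp [h1, h2, (ne_of_lt hgt).symm, h3, Ne.symm (ne_of_gt hgt)]

-- counting step: elements below n+1 = elements below n, plus one if n itself is present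
theorem count_step (p : List Int) (hp : p.Pairwise (· < ·)) (n : Int) :
    (p.filter (fun k => decide (k < n + 1))).length
      = (p.filter (fun k => decide (k < n))).length + (if n ∈ p then 1 else 0) := by
  induction p with
  | nil => simp
  | cons a t ih =>
      rcases List.pairwise_cons.mp hp with ⟨ha, ht⟩
      rcases lt_trichotomy a n with hlt | heq | hgt
      · have e1 : decide (a < n + 1) = true := by simp; omega
        have e2 : decide (a < n) = true := by simpa using hlt
        have hne : n ≠ a := (ne_of_lt hlt).symm
        simp only [List.filter_cons, e1, e2, if_true, List.length_cons, List.mem_cons, hne,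
          false_or]
        rw [ih ht]
        omega
      · subst heq
        have h2 : t.filter (fun k => decide (k < a)) = [] := by
          apply List.filter_eq_nil_iff.mpr
          intro b hb; simp [not_lt.mpr (le_of_lt (ha b hb))]
        have h3 : t.filter (fun k => decide (k < a + 1)) = [] := by
          apply List.filter_eq_nil_iff.mpr
          intro b hb
          have hab := ha b hb
          simp only [decide_eq_true_eq, not_lt]
          omega
        simp [h2]
        exact ha
      · have e1 : decide (a < n + 1) = false := by
          simp only [decide_eq_false_iff_not, not_lt]; omega
        have e2 : decide (a < n) = false := by simp [not_lt.mpr (le_of_lt hgt)]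
        have hne : n ≠ a := ne_of_lt hgt
        have hm : (n ∈ a :: t) = (n ∈ t) := by simp [List.mem_cons, hne]
        simp only [List.filter_cons, e1, e2, Bool.false_eq_true, if_false, hm]
        exact ih ht

-- the loop invariant: after processing range(n), the two folds carry the same dict,
-- B's pointer j counts the present keys below n, A's counter is cc+1+n-j, and A's dict
-- agrees with d0 on every key ≥ n
theorem loop_inv (cc : Int) (d0 : PySem.Dict Int Int)
    (N : Nat) (present : List Int)
    (hp : present.Pairwise (· < ·))
    (hmem : ∀ x : Int, x ∈ present ↔ (d0.contains x = true ∧ 0 ≤ x ∧ x < (N : Int)))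
    (n : Nat) (hn : n ≤ N) :
    ((PySem.List.pyRange 0 (n : Int) 1).foldl
        (fun (st : PySem.Dict Int Int × Int) i =>
          if st.1.contains i then st else (st.1.insert i st.2, st.2 + 1)) (d0, cc + 1)).1
      = ((PySem.List.pyRange 0 (n : Int) 1).foldl
        (fun (st : PySem.Dict Int Int × Int) i =>
          if decide (st.2 < (present.length : Int)) && (PySem.List.pyGet? present st.2 == some i)
          then (st.1, st.2 + 1)
          else (st.1.insert i (cc + 1 + i - st.2), st.2)) (d0, 0)).1
    ∧ ((PySem.List.pyRange 0 (n : Int) 1).foldl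
        (fun (st : PySem.Dict Int Int × Int) i =>
          if decide (st.2 < (present.length : Int)) && (PySem.List.pyGet? present st.2 == some i)
          then (st.1, st.2 + 1)
          else (st.1.insert i (cc + 1 + i - st.2), st.2)) (d0, 0)).2
      = ((present.filter (fun k => decide (k < (n : Int)))).length : Int)
    ∧ ((PySem.List.pyRange 0 (n : Int) 1).foldl
        (fun (st : PySem.Dict Int Int × Int) i =>
          if st.1.contains i then st else (st.1.insert i st.2, st.2 + 1)) (d0, cc + 1)).2
      = cc + 1 + (n : Int) - ((present.filter (fun k => decide (k < (n : Int)))).length : Int)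
    ∧ ∀ x : Int, (n : Int) ≤ x →
        ((PySem.List.pyRange 0 (n : Int) 1).foldl
          (fun (st : PySem.Dict Int Int × Int) i =>
            if st.1.contains i then st else (st.1.insert i st.2, st.2 + 1)) (d0, cc + 1)).1.contains x
        = d0.contains x := by
  induction n with
  | zero =>
      have hfil : present.filter (fun k => decide (k < (0 : Int))) = [] := by
        apply List.filter_eq_nil_iff.mpr
        intro b hb
        have hb' := ((hmem b).mp hb).2.1
        simp only [decide_eq_true_eq, not_lt]
        omega
      simp [PySem.List.pyRange_one_eq_nil, hfil]
  | succ n ih =>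
      obtain ⟨h1, h2, h3, h4⟩ := ih (by omega)
      have hsucc : ((n + 1 : Nat) : Int) = (n : Int) + 1 := by push_cast; ring
      have hr : PySem.List.pyRange 0 ((n : Int) + 1) 1
          = PySem.List.pyRange 0 (n : Int) 1 ++ [(n : Int)] :=
        PySem.List.pyRange_one_succ_right (Int.natCast_nonneg n)
      rw [hsucc, hr]
      simp only [List.foldl_append, List.foldl_cons, List.foldl_nil]
      set sA := (PySem.List.pyRange 0 (n : Int) 1).foldl
        (fun (st : PySem.Dict Int Int × Int) i =>
          if st.1.contains i then st else (st.1.insert i st.2, st.2 + 1)) (d0, cc + 1) with hsA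
      set sB := (PySem.List.pyRange 0 (n : Int) 1).foldl
        (fun (st : PySem.Dict Int Int × Int) i =>
          if decide (st.2 < (present.length : Int)) && (PySem.List.pyGet? present st.2 == some i)
          then (st.1, st.2 + 1)
          else (st.1.insert i (cc + 1 + i - st.2), st.2)) (d0, 0) with hsB
      have hA : sA.1.contains (n : Int) = d0.contains (n : Int) := h4 _ (le_refl _)
      have hmemn : ((n : Int) ∈ present) ↔ d0.contains (n : Int) = true := by
        rw [hmem]
        constructor
        · exact fun h => h.1
        · refine fun h => ⟨h, Int.natCast_nonneg n, ?_⟩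
          exact_mod_cast (by omega : n < N)
      by_cases hc : d0.contains (n : Int) = true
      · obtain ⟨hlt, hgt⟩ := (rank_get present hp (n : Int)).mpr (hmemn.mpr hc)
        have hcond : (decide (sB.2 < (present.length : Int))
            && (PySem.List.pyGet? present sB.2 == some (n : Int))) = true := by
          rw [h2, PySem.List.pyGet?_natCast, hgt]
          simp [hlt]
        simp only [hA, hc, if_true, hcond]
        refine ⟨h1, ?_, ?_, ?_⟩
        · rw [count_step present hp (n : Int), if_pos (hmemn.mpr hc), h2]
          push_cast; ring
        · rw [count_step present hp (n : Int), if_pos (hmemn.mpr hc), h3]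
          push_cast; ring
        · intro x hx
          exact h4 x (by omega)
      · have hnotin : (n : Int) ∉ present := fun h => hc (hmemn.mp h)
        have hcf : d0.contains (n : Int) = false := by simpa using hc
        have hcond : (decide (sB.2 < (present.length : Int))
            && (PySem.List.pyGet? present sB.2 == some (n : Int))) = false := by
          rw [h2, PySem.List.pyGet?_natCast]
          by_cases hl : (present.filter (fun k => decide (k < (n : Int)))).length < present.length
          · have hg : present[(present.filter (fun k => decide (k < (n : Int)))).length]?
                ≠ some (n : Int) := fun hg => hnotin ((rank_get present hp _).mp ⟨hl, hg⟩)
            simp [hg]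
          · simp [hl]
        simp only [hA, hcf, Bool.false_eq_true, if_false, hcond]
        refine ⟨?_, ?_, ?_, ?_⟩
        · rw [h1, h3, h2]
        · rw [count_step present hp (n : Int), if_neg hnotin, h2]
          norm_num
        · rw [count_step present hp (n : Int), if_neg hnotin, h3]
          push_cast; ring
        · intro x hx
          rw [PySem.Dict.contains_insert]
          have hxne : (x == (n : Int)) = false := by
            simp only [beq_eq_false_iff_ne, ne_eq]
            omega
          rw [hxne, Bool.false_or]
          exact h4 x (by omega)

-- ===== VERDICT (by name: the statement is the Claim_ definition above) =====
theorem assign_outliers_spec : Claim_equal_assign_outliers := by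
  intro cc rc coords _
  unfold Spec_assign_outliers assign_outliers assign_outliers_alt
  simp only []
  rw [keys_ofList_zip _ _ (PySem.List.nodup_pyRange_one 0 (coords.length : Int))
      (by simp [PySem.List.length_pyRange_one]), sorted_pyRange]
  set d0 := PySem.Dict.ofList rc with hd0
  set present := PySem.List.sorted
      (d0.keys.filter (fun k => decide (0 ≤ k) && decide (k < (coords.length : Int))))
      (fun x => x) false with hpres
  have hperm : present.Perm
      (d0.keys.filter (fun k => decide (0 ≤ k) && decide (k < (coords.length : Int)))) :=
    PySem.List.sorted_perm _ _ _
  have hnodp : present.Nodup :=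
    hperm.nodup_iff.mpr ((PySem.Dict.nodup_keys_ofList rc).filter _)
  have hple : present.Pairwise (· ≤ ·) := PySem.List.sorted_pairwise _ _
  have hp : present.Pairwise (· < ·) :=
    (hple.and hnodp).imp (fun h => lt_of_le_of_ne h.1 h.2)
  have hmem : ∀ x : Int, x ∈ present ↔
      (d0.contains x = true ∧ 0 ≤ x ∧ x < ((coords.length : Nat) : Int)) := by
    intro x
    rw [PySem.List.mem_sorted, List.mem_filter, ← PySem.Dict.contains_iff_mem_keys]
    simp
  exact congrArg PySem.Dict.items
    (loop_inv cc d0 coords.length present hp hmem coords.length (le_refl _)).1
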